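-- pv_equiv track=rewrite | github.com/bdaene/ilemaths | chaine-de-caracteres-et-algo-885748.py | replace_letters_2
-- ===== SOURCE A (Python) =====
-- from itertools import chain, groupby
-- from string import ascii_uppercase, digits
--
-- def replace_letters_2(message):
--     return ''.join(
--         map(
--             str,
--             chain.from_iterable(
--                 g if k else (i for i, c in enumerate(g, 1))
--                 for k, g in groupby(message, digits.__contains__)
--             )
--         )
--     )
-- ===== SOURCE B (Python) =====
-- from string import digits
--
-- def replace_letters_2(message):
--     result = []
--     counter = 0
--     for c in message:
--         if c in digits:
--             result.append(c)
--             counter = 0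
--         else:
--             counter += 1
--             result.append(str(counter))
--     return ''.join(result)
-- ===== Notes on version B (the rewrite author's own statement) =====
-- stated objective: simpler
-- what changed: Replaced groupby/enumerate/chain grouping with a single pass keeping a reset-on-digit counter; no run is ever materialized.
import Mathlib
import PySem

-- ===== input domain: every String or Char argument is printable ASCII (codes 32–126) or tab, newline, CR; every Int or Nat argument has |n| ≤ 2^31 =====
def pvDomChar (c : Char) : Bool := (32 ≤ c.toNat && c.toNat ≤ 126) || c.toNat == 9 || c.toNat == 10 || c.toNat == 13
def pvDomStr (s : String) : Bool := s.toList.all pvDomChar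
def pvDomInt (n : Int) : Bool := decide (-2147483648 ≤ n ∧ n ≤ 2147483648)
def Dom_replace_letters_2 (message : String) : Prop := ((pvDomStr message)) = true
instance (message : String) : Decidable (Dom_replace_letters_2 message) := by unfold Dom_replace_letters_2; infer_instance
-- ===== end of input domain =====

-- B replaces A's groupby/enumerate/chain grouping with one pass keeping a reset-on-digit counter (objective: simpler).

-- `c in string.digits` for a single character c
def pvIsDigit (c : Char) : Bool := ("0123456789".toList).contains c

-- ===== PORT A =====
-- groupby helper: collect the maximal prefix of cs whose key equals k, plus the rest
def pvTakeRun (k : Bool) : List Char → List Char × List Char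
  | [] => ([], [])
  | c :: cs =>
    if pvIsDigit c = k then
      let p := pvTakeRun k cs
      (c :: p.1, p.2)
    else ([], c :: cs)

theorem pvTakeRun_rest_len (k : Bool) : ∀ cs : List Char, (pvTakeRun k cs).2.length ≤ cs.length
  | [] => by simp [pvTakeRun]
  | c :: cs => by
    by_cases h : pvIsDigit c = k <;>
      simp [pvTakeRun, h]
    exact Nat.le_succ_of_le (pvTakeRun_rest_len k cs)

-- itertools.groupby(message, digits.__contains__)
def pvGroupby : List Char → List (Bool × List Char)
  | [] => []
  | c :: cs =>
    let k := pvIsDigit c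
    let p := pvTakeRun k cs
    (k, c :: p.1) :: pvGroupby p.2
termination_by cs => cs.length
decreasing_by
  simpa using Nat.lt_succ_of_le (pvTakeRun_rest_len (pvIsDigit c) cs)

def replace_letters_2 (message : String) : String :=
  String.mk <|
    (pvGroupby message.toList).flatMap fun kg =>
      if kg.1 then kg.2
      else (List.range' 1 kg.2.length).flatMap fun i => (PySem.Int.toStr (i : Int)).toList

-- ===== PORT B =====
def replace_letters_2_alt (message : String) : String :=
  let r := message.toList.foldl
    (fun (st : List Char × Int) c =>
      if pvIsDigit c then (st.1 ++ [c], 0)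
      else (st.1 ++ (PySem.Int.toStr (st.2 + 1)).toList, st.2 + 1))
    ([], 0)
  String.mk r.1

-- ===== PRECONDITION & SPEC =====
def Spec_replace_letters_2 (message : String) (out : String) : Prop := out = replace_letters_2_alt message
instance (message : String) (out : String) : Decidable (Spec_replace_letters_2 message out) := by unfold Spec_replace_letters_2; infer_instance

-- ===== CLAIM (what is proved, stated in full; the proofs are below) =====
def Claim_equal_replace_letters_2 : Prop := ∀ (message : String), Dom_replace_letters_2 message → Spec_replace_letters_2 message (replace_letters_2 message)

-- ===== LEMMAS AND PROOFS =====

-- common recursive specification: B's loop written as a recursion on the char list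
def pvSpecR (n : Int) : List Char → List Char
  | [] => []
  | c :: cs =>
    if pvIsDigit c then c :: pvSpecR 0 cs
    else (PySem.Int.toStr (n + 1)).toList ++ pvSpecR (n + 1) cs

-- B's fold equals pvSpecR
theorem pvFoldB_eq (cs : List Char) : ∀ (acc : List Char) (n : Int),
    (cs.foldl
      (fun (st : List Char × Int) c =>
        if pvIsDigit c then (st.1 ++ [c], 0)
        else (st.1 ++ (PySem.Int.toStr (st.2 + 1)).toList, st.2 + 1))
      (acc, n)).1 = acc ++ pvSpecR n cs := by
  induction cs with
  | nil => intro acc n; simp [pvSpecR]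
  | cons c cs ih =>
    intro acc n
    by_cases h : pvIsDigit c <;>
      simp only [List.foldl_cons, h, Bool.false_eq_true, if_true, if_false] <;>
      rw [ih] <;> simp [pvSpecR, h, List.append_assoc]

theorem pvTakeRun_append (k : Bool) : ∀ cs : List Char,
    (pvTakeRun k cs).1 ++ (pvTakeRun k cs).2 = cs
  | [] => by simp [pvTakeRun]
  | c :: cs => by
    by_cases h : pvIsDigit c = k <;> simp [pvTakeRun, h, pvTakeRun_append k cs]

theorem pvTakeRun_all (k : Bool) : ∀ cs : List Char, ∀ x ∈ (pvTakeRun k cs).1, pvIsDigit x = k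
  | [], x, hx => by simp [pvTakeRun] at hx
  | c :: cs, x, hx => by
    by_cases h : pvIsDigit c = k <;> simp [pvTakeRun, h] at hx
    rcases hx with rfl | hx
    · exact h
    · exact pvTakeRun_all k cs x hx

theorem pvTakeRun_rest (k : Bool) : ∀ cs : List Char,
    (pvTakeRun k cs).2 = [] ∨ ∃ d ds, (pvTakeRun k cs).2 = d :: ds ∧ pvIsDigit d ≠ k
  | [] => Or.inl rfl
  | c :: cs => by
    by_cases h : pvIsDigit c = k
    · simpa [pvTakeRun, h] using pvTakeRun_rest k cs
    · exact Or.inr ⟨c, cs, by simp [pvTakeRun, h], h⟩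

-- the counter is irrelevant when the list is empty or starts with a digit
theorem pvSpecR_reset {cs : List Char}
    (h : cs = [] ∨ ∃ d ds, cs = d :: ds ∧ pvIsDigit d = true) (n : Int) :
    pvSpecR n cs = pvSpecR 0 cs := by
  rcases h with rfl | ⟨d, ds, rfl, hd⟩
  · rfl
  · simp [pvSpecR, hd]

-- a nonempty run of digits passes through, resetting the counter
theorem pvSpecR_digits : ∀ (g : List Char) (c : Char), pvIsDigit c = true →
    (∀ x ∈ g, pvIsDigit x = true) →
    ∀ (n : Int) (rest : List Char), pvSpecR n (c :: (g ++ rest)) = c :: (g ++ pvSpecR 0 rest)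
  | [], c, hc, _ => by
    intro n rest
    simp [pvSpecR, hc]
  | d :: g, c, hc, h => by
    intro n rest
    have hd := h d (by simp)
    have ih := pvSpecR_digits g d hd (fun x hx => h x (by simp [hx])) 0 rest
    calc pvSpecR n (c :: (d :: g ++ rest))
        = c :: pvSpecR 0 (d :: (g ++ rest)) := by rw [List.cons_append, pvSpecR, if_pos hc]
      _ = c :: (d :: g ++ pvSpecR 0 rest) := by rw [ih]; simp

-- a run of non-digits produces the 1-based indices
theorem pvSpecR_nondigits : ∀ (g : List Char), (∀ x ∈ g, pvIsDigit x = false) →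
    ∀ (n : ℕ) (rest : List Char),
      pvSpecR (n : Int) (g ++ rest) =
        ((List.range' (n + 1) g.length).flatMap fun i => (PySem.Int.toStr (i : Int)).toList)
          ++ pvSpecR ((n + g.length : ℕ) : Int) rest
  | [], _ => by intro n rest; simp
  | c :: g, h => by
    intro n rest
    have hc := h c (by simp)
    have ih := pvSpecR_nondigits g (fun x hx => h x (by simp [hx])) (n + 1) rest
    push_cast at ih ⊢
    simp [pvSpecR, hc, List.range'_succ, ih, List.append_assoc]
    ring_nf

theorem pvMain : ∀ cs : List Char,
    ((pvGroupby cs).flatMap fun kg =>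
      if kg.1 then kg.2
      else (List.range' 1 kg.2.length).flatMap fun i => (PySem.Int.toStr (i : Int)).toList)
      = pvSpecR 0 cs
  | [] => by simp [pvGroupby, pvSpecR]
  | c :: cs => by
    have hlen := pvTakeRun_rest_len (pvIsDigit c) cs
    have ih := pvMain (pvTakeRun (pvIsDigit c) cs).2
    have happ := pvTakeRun_append (pvIsDigit c) cs
    have hall := pvTakeRun_all (pvIsDigit c) cs
    have hrest := pvTakeRun_rest (pvIsDigit c) cs
    rw [pvGroupby]
    simp only [List.flatMap_cons]
    rw [ih]
    conv_rhs => rw [← happ]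
    by_cases h : pvIsDigit c
    · rw [if_pos h, pvSpecR_digits _ c h (fun x hx => (hall x hx).trans h)]
      simp
    · have hc : pvIsDigit c = false := by simpa using h
      have hallf : ∀ x ∈ c :: (pvTakeRun (pvIsDigit c) cs).1, pvIsDigit x = false := by
        intro x hx
        rcases List.mem_cons.mp hx with rfl | hx
        · exact hc
        · exact (hall x hx).trans hc
      have hn := pvSpecR_nondigits (c :: (pvTakeRun (pvIsDigit c) cs).1) hallf 0
        (pvTakeRun (pvIsDigit c) cs).2
      have hreset : pvSpecR (((0 + (c :: (pvTakeRun (pvIsDigit c) cs).1).length : ℕ)) : Int)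
          (pvTakeRun (pvIsDigit c) cs).2 = pvSpecR 0 (pvTakeRun (pvIsDigit c) cs).2 := by
        apply pvSpecR_reset
        rcases hrest with he | ⟨d, ds, hd, hne⟩
        · exact Or.inl he
        · refine Or.inr ⟨d, ds, hd, ?_⟩
          rw [hc] at hne
          simpa using hne
      rw [if_neg h]
      push_cast at hn
      simp only [List.cons_append] at hn
      rw [hn]
      push_cast at hreset
      rw [hreset]
termination_by cs => cs.length
decreasing_by
  simpa using Nat.lt_succ_of_le (pvTakeRun_rest_len (pvIsDigit c) cs)

-- ===== VERDICT (by name: the statement is the Claim_ definition above) =====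
theorem replace_letters_2_spec : Claim_equal_replace_letters_2 := by
  intro message _
  unfold Spec_replace_letters_2 replace_letters_2 replace_letters_2_alt
  dsimp only
  rw [pvFoldB_eq, pvMain]
  simp
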